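-- pv_equiv track=rewrite | github.com/RauPro/Competitive-Programming | Meta Hacker Cup 2024/Round 1/A/A.py | solve
-- ===== SOURCE A (Python) =====
-- def solve(n ,k, a ):
--     ans = 0
--     a.sort()
--     for i in range(1, n):
--         if i == n-1:
--             ans+=a[0]
--         else:
--             ans += a[0]*2
--
--     ans += a[0] if n == 1 else 0
--     return "YES" if ans <= k else "NO"
-- ===== SOURCE B (Python) =====
-- def solve(n, k, a):
--     # Closed form: the loop in A adds min(a) once and 2*min(a) for each of the
--     # other n-2 iterations, i.e. min(a)*(2*n-3) for n>=2; min(a) for n==1; 0 for n<=0.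
--     if n <= 0:
--         ans = 0
--     elif n == 1:
--         ans = min(a)
--     else:
--         ans = min(a) * (2 * n - 3)
--     return "YES" if ans <= k else "NO"
-- ===== Notes on version B (the rewrite author's own statement) =====
-- stated objective: faster
-- what changed: Replaces A's sort plus O(n) accumulation loop by a single min() scan and the closed-form total min(a)*(2n-3) (min(a) for n=1, 0 for n<=0).
import Mathlib
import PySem

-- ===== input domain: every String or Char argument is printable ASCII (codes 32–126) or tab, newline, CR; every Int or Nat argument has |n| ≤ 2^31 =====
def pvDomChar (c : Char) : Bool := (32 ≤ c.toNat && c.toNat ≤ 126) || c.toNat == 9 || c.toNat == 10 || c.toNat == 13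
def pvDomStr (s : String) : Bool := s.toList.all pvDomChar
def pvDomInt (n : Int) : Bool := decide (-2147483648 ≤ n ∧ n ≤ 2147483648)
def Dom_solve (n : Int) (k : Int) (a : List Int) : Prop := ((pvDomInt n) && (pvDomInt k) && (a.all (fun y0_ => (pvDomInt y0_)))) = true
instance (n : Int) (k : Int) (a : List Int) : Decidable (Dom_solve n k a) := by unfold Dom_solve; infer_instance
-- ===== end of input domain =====

-- B replaces A's sort + accumulation loop by min(a) and the closed form min(a)*(2n-3) (faster).
-- A sorts its list argument in place; the equivalence proved here is about the return value only.

-- ===== PORT A =====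
-- a[0] is ported as pyGetD s 0 0: on Pre_-admitted inputs it is only evaluated when a ≠ [],
-- where it is exact (Python raises IndexError exactly on the inputs Pre_ excludes).
def solve (n : Int) (k : Int) (a : List Int) : String :=
  let s := PySem.List.sorted a (fun x => x) false
  let ans : Int :=
    (PySem.List.pyRange 1 n 1).foldl
      (fun ans i =>
        if i == n - 1 then ans + PySem.List.pyGetD s 0 0
        else ans + PySem.List.pyGetD s 0 0 * 2) 0
  let ans := ans + (if n == 1 then PySem.List.pyGetD s 0 0 else 0)
  if ans ≤ k then "YES" else "NO"

-- ===== PORT B =====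
-- min(a) is ported as (min? a).getD 0: B only evaluates it when a ≠ [] on Pre_-admitted
-- inputs, where it is exact (Python's min raises ValueError exactly on the excluded inputs).
def solve_alt (n : Int) (k : Int) (a : List Int) : String :=
  let ans : Int :=
    if n ≤ 0 then 0
    else if n == 1 then (PySem.List.min? a (fun x => x)).getD 0
    else (PySem.List.min? a (fun x => x)).getD 0 * (2 * n - 3)
  if ans ≤ k then "YES" else "NO"

-- ===== PRECONDITION & SPEC =====
-- A raises IndexError (a[0] on an empty list) whenever n ≥ 1 and a = []; B raises there too
-- (min of an empty sequence). Exactly those inputs are excluded.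
def Pre_solve (n : Int) (k : Int) (a : List Int) : Prop := a ≠ [] ∨ n ≤ 0
instance (n : Int) (k : Int) (a : List Int) : Decidable (Pre_solve n k a) := by unfold Pre_solve; infer_instance
def pvWitness_solve : Int × Int × List Int := (3, 5, [2, 1, 4])

def Spec_solve (n : Int) (k : Int) (a : List Int) (out : String) : Prop := out = solve_alt n k a
instance (n : Int) (k : Int) (a : List Int) (out : String) : Decidable (Spec_solve n k a out) := by unfold Spec_solve; infer_instance

-- ===== CLAIM (what is proved, stated in full; the proofs are below) =====
def Claim_equal_solve : Prop := ∀ (n : Int) (k : Int) (a : List Int), Dom_solve n k a → Pre_solve n k a → Spec_solve n k a (solve n k a)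

-- ===== LEMMAS AND PROOFS =====

-- head of sorted(a) = min(a) for nonempty a
theorem head_sorted_eq_min (a : List Int) (h : a ≠ []) :
    PySem.List.pyGetD (PySem.List.sorted a (fun x => x) false) 0 0
      = (PySem.List.min? a (fun x => x)).getD 0 := by
  obtain ⟨m, t, hs⟩ : ∃ m t, PySem.List.sorted a (fun x => x) false = m :: t := by
    cases hsor : PySem.List.sorted a (fun x => x) false with
    | nil => exact absurd ((PySem.List.sorted_eq_nil_iff _ _ _).1 hsor) h
    | cons m t => exact ⟨m, t, rfl⟩
  obtain ⟨m', hm'⟩ : ∃ m', PySem.List.min? a (fun x => x) = some m' := by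
    cases hmin : PySem.List.min? a (fun x => x) with
    | none => exact absurd ((PySem.List.min?_eq_none_iff _ _).1 hmin) h
    | some m' => exact ⟨m', rfl⟩
  have hmem : m ∈ a := (PySem.List.mem_sorted _ _ _ _).1 (by rw [hs]; exact List.mem_cons_self)
  have hm'mem : m' ∈ a := PySem.List.min?_mem hm'
  have h1 : m ≤ m' := PySem.List.key_head_sorted_le a (fun x => x) hs m' hm'mem
  have h2 : m' ≤ m := PySem.List.min?_isMin hm' m hmem
  rw [hs, hm']
  simp [PySem.List.pyGetD]
  omega

-- a fold that adds a constant c per element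
theorem foldl_const_add (l : List Int) (c : Int) :
    l.foldl (fun ans _ => ans + c) 0 = (l.length : Int) * c := by
  have key : ∀ (init : Int), l.foldl (fun ans _ => ans + c) init = init + (l.length : Int) * c := by
    induction l with
    | nil => intro init; simp
    | cons x t ih =>
      intro init
      simp only [List.foldl_cons, List.length_cons, ih]
      push_cast
      ring
  simpa using key 0

-- closed form of A's accumulation loop for n ≥ 2
theorem loop_closed_form (n m : Int) (h : 2 ≤ n) :
    (PySem.List.pyRange 1 n 1).foldl
      (fun ans i => if i == n - 1 then ans + m else ans + m * 2) 0
      = m * (2 * n - 3) := by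
  rw [PySem.List.pyRange_one_append 1 (n - 1) n (by omega) (by omega), List.foldl_append]
  have hlast : PySem.List.pyRange (n - 1) n 1 = [n - 1] := by
    have := PySem.List.pyRange_one_singleton (n - 1)
    simpa [show n - 1 + 1 = n by omega] using this
  rw [hlast]
  have hpre : (PySem.List.pyRange 1 (n - 1) 1).foldl
      (fun ans i => if i == n - 1 then ans + m else ans + m * 2) 0
      = (PySem.List.pyRange 1 (n - 1) 1).foldl (fun ans _ => ans + m * 2) 0 := by
    apply PySem.List.foldl_congr_mem
    intro acc x hx
    have hx' := PySem.List.mem_pyRange_one.1 hx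
    have : x ≠ n - 1 := by omega
    simp [this]
  rw [hpre]
  simp only [List.foldl_cons, List.foldl_nil, beq_self_eq_true, if_true]
  rw [foldl_const_add (PySem.List.pyRange 1 (n - 1) 1) (m * 2)]
  have hlen : ((PySem.List.pyRange 1 (n - 1) 1).length : Int) = n - 2 := by
    rw [PySem.List.length_pyRange_one]
    omega
  rw [hlen]
  ring

-- ===== VERDICT (by name: the statement is the Claim_ definition above) =====
theorem solve_spec : Claim_equal_solve := by
  intro n k a _ hpre
  unfold Spec_solve solve solve_alt
  dsimp only
  by_cases hn0 : n ≤ 0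
  · have hr : PySem.List.pyRange 1 n 1 = [] := PySem.List.pyRange_one_eq_nil (by omega)
    have hn1 : ¬ (n == 1) = true := by simp; omega
    simp [hr, hn1, hn0]
  · have hne : a ≠ [] := by
      rcases hpre with h | h
      · exact h
      · omega
    rw [head_sorted_eq_min a hne]
    by_cases hn1 : n = 1
    · subst hn1
      simp [PySem.List.pyRange_one_eq_nil (by omega : (1:Int) ≤ 1)]
    · have h2 : 2 ≤ n := by omega
      rw [loop_closed_form n _ h2]
      have : ¬ (n == 1) = true := by simp [hn1]
      simp [this, hn0]
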